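-- pv_equiv track=rewrite | github.com/BobReed24/all-projects | python/project_euler/problem_094/sol1.py | solution
-- ===== SOURCE A (Python) =====
-- def solution(max_perimeter: int = 10**9) -> int:
--
--     prev_value = 1
--     value = 2
--
--     perimeters_sum = 0
--     i = 0
--     perimeter = 0
--     while perimeter <= max_perimeter:
--         perimeters_sum += perimeter
--
--         prev_value += 2 * value
--         value += prev_value
--
--         perimeter = 2 * value + 2 if i % 2 == 0 else 2 * value - 2
--         i += 1
--
--     return perimeters_sum
-- ===== SOURCE B (Python) =====
-- def solution(max_perimeter: int = 10**9) -> int: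
--     total = 0
--     p0, p1, p2 = 2, 16, 50
--     while p1 <= max_perimeter:
--         total += p1
--         p0, p1, p2 = p1, p2, 3 * p2 + 3 * p1 - p0
--     return total
-- ===== Notes on version B (the rewrite author's own statement) =====
-- stated objective: simpler
-- what changed: B drops A's Pell-like side-length pair (prev_value, value) and the alternating parity correction, and instead sums the perimeters directly via a single third-order linear recurrence on the perimeters themselves.
import Mathlib
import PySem

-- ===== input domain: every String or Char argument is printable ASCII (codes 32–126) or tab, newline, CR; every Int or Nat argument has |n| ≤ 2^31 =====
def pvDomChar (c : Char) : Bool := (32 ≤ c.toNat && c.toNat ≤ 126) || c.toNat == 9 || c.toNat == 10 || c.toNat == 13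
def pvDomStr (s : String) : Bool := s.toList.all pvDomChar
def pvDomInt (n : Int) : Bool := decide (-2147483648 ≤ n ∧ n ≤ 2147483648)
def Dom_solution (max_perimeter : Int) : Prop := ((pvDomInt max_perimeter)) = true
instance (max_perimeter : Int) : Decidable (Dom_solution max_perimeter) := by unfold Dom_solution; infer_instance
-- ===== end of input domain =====

-- B replaces A's side-length pair recurrence with alternating ±2 by one direct
-- third-order linear recurrence on the perimeters themselves (simpler, same cost).

-- ===== PORT A =====
-- A's while loop, step for step; the Prop argument is the loop invariant needed
-- only so Lean can see that the perimeter strictly grows (termination); it does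
-- not change the computation.
def loopA (maxp prev value i per sum : Int)
    (h : 1 ≤ prev ∧ 2 ≤ value ∧ per ≤ 2 * value + 2) : Int :=
  if hle : per ≤ maxp then
    loopA maxp (prev + 2 * value) (value + (prev + 2 * value)) (i + 1)
      (if PySem.Int.mod i 2 == 0 then 2 * (value + (prev + 2 * value)) + 2
       else 2 * (value + (prev + 2 * value)) - 2)
      (sum + per)
      ⟨by omega, by omega, by split <;> omega⟩
  else sum
termination_by (maxp + 3 - per).toNat
decreasing_by split <;> omega

def solution (max_perimeter : Int) : Int :=
  loopA max_perimeter 1 2 0 0 0 ⟨by norm_num, by norm_num, by norm_num⟩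

-- ===== PORT B =====
-- B's while loop; the Prop argument is the termination invariant (p1 grows).
def loopB (maxp p0 p1 p2 total : Int)
    (h : 2 ≤ p0 ∧ p0 < p1 ∧ p1 < p2) : Int :=
  if hle : p1 ≤ maxp then
    loopB maxp p1 p2 (3 * p2 + 3 * p1 - p0) (total + p1) ⟨by omega, by omega, by omega⟩
  else total
termination_by (maxp + 1 - p1).toNat
decreasing_by omega

def solution_alt (max_perimeter : Int) : Int :=
  loopB max_perimeter 2 16 50 0 ⟨by norm_num, by norm_num, by norm_num⟩

-- ===== PRECONDITION & SPEC =====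
def Spec_solution (max_perimeter : Int) (out : Int) : Prop := out = solution_alt max_perimeter
instance (max_perimeter : Int) (out : Int) : Decidable (Spec_solution max_perimeter out) := by unfold Spec_solution; infer_instance

-- ===== CLAIM (what is proved, stated in full; the proofs are below) =====
def Claim_equal_solution : Prop := ∀ (max_perimeter : Int), Dom_solution max_perimeter → Spec_solution max_perimeter (solution max_perimeter)

-- ===== LEMMAS AND PROOFS =====

-- parity of i flips each step
lemma modflip (i : Int) : (PySem.Int.mod (i + 1) 2 == 0) = !(PySem.Int.mod i 2 == 0) := by
  rw [PySem.Int.mod_eq_emod_of_pos (by norm_num : (0:Int) < 2),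
      PySem.Int.mod_eq_emod_of_pos (by norm_num : (0:Int) < 2)]
  rcases Int.emod_two_eq i with h | h
  · have h1 : (i + 1) % 2 = 1 := by omega
    simp [h, h1]
  · have h1 : (i + 1) % 2 = 0 := by omega
    simp [h, h1]

-- loopB only depends on its integer arguments (proof irrelevance)
lemma loopB_congr {maxp p0 p1 p2 t p0' p1' p2' t' : Int}
    {h : 2 ≤ p0 ∧ p0 < p1 ∧ p1 < p2} {h' : 2 ≤ p0' ∧ p0' < p1' ∧ p1' < p2'}
    (e0 : p0 = p0') (e1 : p1 = p1') (e2 : p2 = p2') (e3 : t = t') :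
    loopB maxp p0 p1 p2 t h = loopB maxp p0' p1' p2' t' h' := by
  subst e0; subst e1; subst e2; subst e3; rfl

-- loopA only depends on its integer arguments (proof irrelevance)
lemma loopA_congr {maxp p v i per s p' v' i' per' s' : Int}
    {h : 1 ≤ p ∧ 2 ≤ v ∧ per ≤ 2 * v + 2} {h' : 1 ≤ p' ∧ 2 ≤ v' ∧ per' ≤ 2 * v' + 2}
    (e1 : p = p') (e2 : v = v') (e3 : i = i') (e4 : per = per') (e5 : s = s') :
    loopA maxp p v i per s h = loopA maxp p' v' i' per' s' h' := by
  subst e1; subst e2; subst e3; subst e4; subst e5; rfl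

-- simulation: once A is past its first (degenerate, perimeter 0) iteration, its
-- state (prev, value, i, per) corresponds to B's perimeter triple
-- (2*(value-prev) - e, per, 2*prev + 6*value - e) where e = -2/2 by parity of i.
lemma loopA_eq_loopB :
    ∀ (n : Nat) (maxp prev value i per sum : Int)
      (hA : 1 ≤ prev ∧ 2 ≤ value ∧ per ≤ 2 * value + 2)
      (hB : 2 ≤ 2 * (value - prev) - (if PySem.Int.mod i 2 == 0 then (-2 : Int) else 2) ∧
            2 * (value - prev) - (if PySem.Int.mod i 2 == 0 then (-2 : Int) else 2) < per ∧
            per < 2 * prev + 6 * value - (if PySem.Int.mod i 2 == 0 then (-2 : Int) else 2)),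
      (maxp + 3 - per).toNat = n →
      3 ≤ prev → prev + 2 ≤ value →
      per = 2 * value + (if PySem.Int.mod i 2 == 0 then (-2 : Int) else 2) →
      loopA maxp prev value i per sum hA
        = loopB maxp (2 * (value - prev) - (if PySem.Int.mod i 2 == 0 then (-2 : Int) else 2))
            per (2 * prev + 6 * value - (if PySem.Int.mod i 2 == 0 then (-2 : Int) else 2)) sum hB := by
  intro n
  induction n using Nat.strong_induction_on with
  | _ n ih =>
    intro maxp prev value i per sum hA hB hn h3 h4 hper
    rw [loopA, loopB]
    by_cases hle : per ≤ maxp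
    · rw [dif_pos hle, dif_pos hle]
      have hflip := modflip i
      by_cases hp : (PySem.Int.mod i 2 == 0) = true
      · have hp' : (PySem.Int.mod (i + 1) 2 == 0) = false := by
          rw [hflip, hp]; rfl
        simp only [hp, if_true] at hper ⊢
        have H := ih (maxp + 3 - (2 * (value + (prev + 2 * value)) + 2)).toNat
          (by omega)
          maxp (prev + 2 * value) (value + (prev + 2 * value)) (i + 1)
          (2 * (value + (prev + 2 * value)) + 2) (sum + per)
          ⟨by omega, by omega, by omega⟩
          (by simp only [hp']; exact ⟨by omega, by omega, by omega⟩)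
          rfl (by omega) (by omega) (by simp only [hp']; norm_num)
        simp only [hp'] at H
        norm_num at H ⊢
        exact H.trans (loopB_congr (by omega) (by omega) (by omega) rfl)
      · rw [Bool.not_eq_true] at hp
        have hp' : (PySem.Int.mod (i + 1) 2 == 0) = true := by
          rw [hflip, hp]; rfl
        simp only [hp, Bool.false_eq_true, if_false] at hper ⊢
        have H := ih (maxp + 3 - (2 * (value + (prev + 2 * value)) - 2)).toNat
          (by omega)
          maxp (prev + 2 * value) (value + (prev + 2 * value)) (i + 1)
          (2 * (value + (prev + 2 * value)) - 2) (sum + per)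
          ⟨by omega, by omega, by omega⟩
          (by simp only [hp']; exact ⟨by omega, by omega, by omega⟩)
          rfl (by omega) (by omega) (by simp only [hp']; norm_num; omega)
        simp only [hp'] at H
        norm_num at H ⊢
        exact H.trans (loopB_congr (by omega) (by omega) (by omega) rfl)
    · rw [dif_neg hle, dif_neg hle]

-- ===== VERDICT (by name: the statement is the Claim_ definition above) =====
theorem solution_spec : Claim_equal_solution := by
  intro maxp _
  unfold Spec_solution solution solution_alt
  rw [loopA]
  by_cases h0 : (0 : Int) ≤ maxp
  · rw [dif_pos h0]
    have key := loopA_eq_loopB (maxp + 3 - 16).toNat maxp 5 7 1 16 0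
      ⟨by norm_num, by norm_num, by norm_num⟩
      (by decide) rfl (by norm_num) (by norm_num) (by decide)
    exact Eq.trans
      (loopA_congr (by decide) (by decide) (by decide) (by decide) (by decide))
      (key.trans (loopB_congr (by decide) (by decide) (by decide) rfl))
  · rw [dif_neg h0]
    rw [loopB, dif_neg (by omega)]
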